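-- pv_equiv track=rewrite | github.com/SashaNyhus/2023adventofcode | day03.py | find_numbers_in_row
-- ===== SOURCE A (Python) =====
-- def find_numbers_in_row(row):
--     numbers_found = []
--     working_number = ""
--     working_index_start = None
--     for element_index in range(0, len(row)):
--         element = row[element_index]
--         if element.isnumeric():
--             working_number = working_number + element
--             if working_index_start is None:
--                 working_index_start = element_index
--         elif len(working_number) > 0:
--             numbers_found.append({
--                 'number_value': int(working_number),
--                 'index_start': working_index_start,
--                 'index_end': element_index - 1
--             })
--             working_number = ""
--             working_index_start = None
--     # the above code doesn't work for numbers at the end of the line, since it relies on finding a character that's not a number to recognize that a number has ended.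
--     # So before we move on, check to see if we still have working number data
--     if len(working_number) > 0:
--         numbers_found.append({
--             'number_value': int(working_number),
--             'index_start': working_index_start,
--             'index_end': len(row) - 1
--             })
--     return numbers_found
-- ===== SOURCE B (Python) =====
-- def find_numbers_in_row(row):
--     # Two-pointer run scanner: find each maximal digit run [i, j) and convert the
--     # whole slice at once, instead of A's per-character accumulator state machine.
--     numbers_found = []
--     n = len(row)
--     i = 0
--     while i < n:
--         if row[i].isnumeric():
--             j = i
--             while j < n and row[j].isnumeric():
--                 j += 1
--             numbers_found.append({
--                 'number_value': int(row[i:j]),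
--                 'index_start': i,
--                 'index_end': j - 1
--             })
--             i = j
--         else:
--             i += 1
--     return numbers_found
-- ===== Notes on version B (the rewrite author's own statement) =====
-- stated objective: simpler
-- what changed: Replaced A's per-character accumulator state machine (working_number string, optional start index, end-of-line flush) with a two-pointer scan that locates each maximal digit run and converts the slice in one int() call, eliminating the flush special case.
import Mathlib
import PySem

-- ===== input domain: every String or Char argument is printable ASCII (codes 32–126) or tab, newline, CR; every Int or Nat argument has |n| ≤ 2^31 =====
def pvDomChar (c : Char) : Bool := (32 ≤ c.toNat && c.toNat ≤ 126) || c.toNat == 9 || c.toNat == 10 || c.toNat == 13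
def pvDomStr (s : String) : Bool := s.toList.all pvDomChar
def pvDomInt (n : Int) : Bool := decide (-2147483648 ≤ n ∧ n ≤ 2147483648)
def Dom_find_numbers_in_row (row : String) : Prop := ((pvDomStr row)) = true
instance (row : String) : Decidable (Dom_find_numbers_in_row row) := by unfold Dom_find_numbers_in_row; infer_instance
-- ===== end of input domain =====

-- B replaces A's per-character accumulator state machine with a two-pointer scan over
-- maximal digit runs (objective: simpler — no working state, no end-of-line flush).

-- int(<digit string>) : exact for the nonempty all-digit strings both programs apply it to
def pyIntDigits (cs : List Char) : Int := (PySem.Int.ofChars? cs).getD 0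

-- a number record {'number_value': v, 'index_start': s, 'index_end': e} in insertion order
def numRec (v s e : Int) : List (String × Int) :=
  [("number_value", v), ("index_start", s), ("index_end", e)]

-- ===== PORT A =====
-- the for-loop over range(len(row)); state = (numbers_found, working_number, working_index_start);
-- on []: the end-of-line flush (element_index has reached len(row), so index_end = i - 1).
-- `.isnumeric()` is ported as Char.isDigit: exact on the ASCII domain Dom_.
-- `start.getD 0` never defaults: whenever working ≠ [] Python has stored an int in working_index_start.
def loopA (found : List (List (String × Int))) (working : List Char)
    (start : Option Int) (i : Int) : List Char → List (List (String × Int))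
  | [] => if working.length > 0 then found ++ [numRec (pyIntDigits working) (start.getD 0) (i - 1)] else found
  | c :: rest =>
    if c.isDigit then
      loopA found (working ++ [c]) (if start = none then some i else start) (i + 1) rest
    else if working.length > 0 then
      loopA (found ++ [numRec (pyIntDigits working) (start.getD 0) (i - 1)]) [] none (i + 1) rest
    else
      loopA found working start (i + 1) rest

def find_numbers_in_row (row : String) : List (List (String × Int)) :=
  loopA [] [] none 0 row.toList

-- ===== PORT B =====
-- outer while over i; the inner `while j < n and row[j].isnumeric(): j += 1` plus the
-- slice row[i:j] become takeWhile/dropWhile on the suffix behind the current char; then i jumps to j.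
def scanB (i : Int) (cs : List Char) : List (List (String × Int)) :=
  match cs with
  | [] => []
  | c :: rest =>
    if c.isDigit then
      let run := c :: List.takeWhile Char.isDigit rest
      numRec (pyIntDigits run) i (i + run.length - 1) ::
        scanB (i + run.length) (List.dropWhile Char.isDigit rest)
    else scanB (i + 1) rest
termination_by cs.length
decreasing_by
· have h := congrArg List.length (List.takeWhile_append_dropWhile (p := Char.isDigit) (l := rest))
  simp only [List.length_append] at h
  simp only [List.length_cons]
  omega
· simp

def find_numbers_in_row_alt (row : String) : List (List (String × Int)) :=
  scanB 0 row.toList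

-- ===== PRECONDITION & SPEC =====
def Spec_find_numbers_in_row (row : String) (out : List (List (String × Int))) : Prop := out = find_numbers_in_row_alt row
instance (row : String) (out : List (List (String × Int))) : Decidable (Spec_find_numbers_in_row row out) := by unfold Spec_find_numbers_in_row; infer_instance

-- ===== CLAIM (what is proved, stated in full; the proofs are below) =====
def Claim_equal_find_numbers_in_row : Prop := ∀ (row : String), Dom_find_numbers_in_row row → Spec_find_numbers_in_row row (find_numbers_in_row row)

-- ===== LEMMAS AND PROOFS =====

theorem dropWhile_head_not_digit : ∀ (l : List Char) (c : Char) (t : List Char),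
    List.dropWhile Char.isDigit l = c :: t → c.isDigit = false := by
  intro l
  induction l with
  | nil => intro c t h; simp [List.dropWhile] at h
  | cons a l ih =>
    intro c t h
    by_cases hp : a.isDigit
    · exact ih c t (by simpa [List.dropWhile_cons, hp] using h)
    · simp only [List.dropWhile_cons, hp] at h
      simp only [Bool.false_eq_true, if_false, List.cons.injEq] at h
      obtain ⟨rfl, -⟩ := h
      simpa using hp

-- A's loop with a nonempty working number flushes exactly at the end of the current digit
-- run (index_end = i + |run| - 1 in both the mid-line and the end-of-line case) and then
-- restarts clean on the rest.
theorem loopA_run (cs : List Char) : ∀ (w : List Char) (s i : Int)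
    (found : List (List (String × Int))), w ≠ [] →
    loopA found w (some s) i cs =
      (match List.dropWhile Char.isDigit cs with
       | [] => found ++ [numRec (pyIntDigits (w ++ List.takeWhile Char.isDigit cs)) s
                  (i + (List.takeWhile Char.isDigit cs).length - 1)]
       | _ :: rest' => loopA (found ++ [numRec (pyIntDigits (w ++ List.takeWhile Char.isDigit cs)) s
                  (i + (List.takeWhile Char.isDigit cs).length - 1)]) [] none
                  (i + (List.takeWhile Char.isDigit cs).length + 1) rest') := by
  induction cs with
  | nil =>
    intro w s i found hw
    simp [loopA, List.length_pos_iff.mpr hw]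
  | cons c rest ih =>
    intro w s i found hw
    by_cases hd : c.isDigit
    · have h1 : loopA found w (some s) i (c :: rest)
          = loopA found (w ++ [c]) (some s) (i + 1) rest := by
        simp [loopA, hd]
      rw [h1, ih (w ++ [c]) s (i + 1) found (by simp)]
      simp only [List.takeWhile_cons, List.dropWhile_cons, hd, if_true]
      have e1 : w ++ [c] ++ List.takeWhile Char.isDigit rest
          = w ++ c :: List.takeWhile Char.isDigit rest := by simp
      have e2 : i + 1 + ((List.takeWhile Char.isDigit rest).length : Int) - 1
          = i + ((c :: List.takeWhile Char.isDigit rest).length : Int) - 1 := by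
        simp only [List.length_cons]; push_cast; ring
      have e3 : i + 1 + ((List.takeWhile Char.isDigit rest).length : Int) + 1
          = i + ((c :: List.takeWhile Char.isDigit rest).length : Int) + 1 := by
        simp only [List.length_cons]; push_cast; ring
      cases List.dropWhile Char.isDigit rest with
      | nil => rw [e1, e2]
      | cons x xs => rw [e1, e2, e3]
    · simp only [loopA, hd, List.takeWhile_cons, List.dropWhile_cons, Bool.false_eq_true,
        if_false, List.length_pos_iff.mpr hw, if_pos]
      simp

-- from a clean state, A's loop appends exactly B's scan
theorem loopA_clean (n : Nat) : ∀ (cs : List Char), cs.length ≤ n → ∀ (i : Int)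
    (found : List (List (String × Int))),
    loopA found [] none i cs = found ++ scanB i cs := by
  induction n with
  | zero =>
    intro cs hlen i found
    have : cs = [] := by cases cs <;> simp_all
    subst this; simp [loopA, scanB]
  | succ n ih =>
    intro cs hlen i found
    match cs with
    | [] => simp [loopA, scanB]
    | c :: rest =>
      by_cases hd : c.isDigit
      · have h1 : loopA found [] none i (c :: rest) =
            loopA found [c] (some i) (i + 1) rest := by
          simp [loopA, hd]
        rw [h1, loopA_run rest [c] i (i + 1) found (by simp)]
        rw [scanB]
        simp only [hd, if_true]
        have hdrop : (List.takeWhile Char.isDigit rest).length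
            + (List.dropWhile Char.isDigit rest).length = rest.length := by
          rw [← List.length_append, List.takeWhile_append_dropWhile]
        have e1 : ([c] : List Char) ++ List.takeWhile Char.isDigit rest
            = c :: List.takeWhile Char.isDigit rest := by simp
        have e2 : i + 1 + ((List.takeWhile Char.isDigit rest).length : Int) - 1
            = i + ((c :: List.takeWhile Char.isDigit rest).length : Int) - 1 := by
          simp only [List.length_cons]; push_cast; ring
        cases hrest : List.dropWhile Char.isDigit rest with
        | nil =>
          simp only [scanB]
          rw [e1, e2]
        | cons c' rest' =>
          have hc' : c'.isDigit = false := dropWhile_head_not_digit rest c' rest' hrest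
          have hlen'' : rest'.length ≤ n := by
            rw [hrest] at hdrop
            simp only [List.length_cons] at hdrop hlen
            omega
          have e3 : i + 1 + ((List.takeWhile Char.isDigit rest).length : Int) + 1
              = i + ((c :: List.takeWhile Char.isDigit rest).length : Int) + 1 := by
            simp only [List.length_cons]; push_cast; ring
          have hsc : scanB (i + ((c :: List.takeWhile Char.isDigit rest).length : Int)) (c' :: rest')
              = scanB (i + ((c :: List.takeWhile Char.isDigit rest).length : Int) + 1) rest' := by
            rw [scanB]; simp [hc']
          dsimp only
          rw [e1, e2, e3, ih rest' hlen'' _ _, hsc]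
          simp [List.append_assoc]
      · have h1 : loopA found [] none i (c :: rest) = loopA found [] none (i + 1) rest := by
          simp [loopA, hd]
        rw [h1, ih rest (by simp only [List.length_cons] at hlen; omega) _ _]
        rw [scanB]
        simp [hd]

-- ===== VERDICT (by name: the statement is the Claim_ definition above) =====
theorem find_numbers_in_row_spec : Claim_equal_find_numbers_in_row := by
  intro row _
  unfold Spec_find_numbers_in_row find_numbers_in_row find_numbers_in_row_alt
  simpa using loopA_clean row.toList.length row.toList le_rfl 0 []
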